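-- pv_equiv track=rewrite | github.com/12mativ/air_food | handle_food_index.py | handle_food_index
-- ===== SOURCE A (Python) =====
-- index_ranges = [
--     {"index_range": (0, 5), "quality_type": 'bad'},
--     {"index_range": (5, 10), "quality_type": 'medium'},
--     {"index_range": (10, 15), "quality_type": 'good'},
-- ]
--
-- def handle_food_index(food_index):
--     is_find_range = False
--     for index in index_ranges:
--         index_range = index["index_range"]
--         if index_range[0] <= food_index < index_range[1]:
--             is_find_range = True
--             return index["quality_type"]
--     if not is_find_range:
--         return 'good'
-- ===== SOURCE B (Python) =====
-- def handle_food_index(food_index):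
--     if 0 <= food_index < 5:
--         return 'bad'
--     if 5 <= food_index < 10:
--         return 'medium'
--     return 'good'
-- ===== Notes on version B (the rewrite author's own statement) =====
-- stated objective: simpler
-- what changed: Replaces the module-level list of range dicts and the search loop with a direct conditional chain over the same half-open boundaries (negatives and >=10 fall to 'good').
import Mathlib
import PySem

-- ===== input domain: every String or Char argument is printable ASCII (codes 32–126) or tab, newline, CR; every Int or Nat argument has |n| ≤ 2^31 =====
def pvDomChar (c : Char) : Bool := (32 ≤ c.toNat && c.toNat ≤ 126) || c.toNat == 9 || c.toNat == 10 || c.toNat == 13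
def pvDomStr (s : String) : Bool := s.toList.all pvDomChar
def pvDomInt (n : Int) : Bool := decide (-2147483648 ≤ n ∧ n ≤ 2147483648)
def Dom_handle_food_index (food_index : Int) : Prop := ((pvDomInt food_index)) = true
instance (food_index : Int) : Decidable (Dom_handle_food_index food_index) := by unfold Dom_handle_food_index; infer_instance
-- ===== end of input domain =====

-- B replaces the range-table search loop with a direct conditional chain; objective: simpler.

-- ===== PORT A =====
-- module-level table: list of dicts with an "index_range" pair and a "quality_type"
def index_ranges : List ((Int × Int) × String) :=
  [((0, 5), "bad"), ((5, 10), "medium"), ((10, 15), "good")]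

-- the for-loop with early return, as structural recursion over the table
def handle_food_index_loop : List ((Int × Int) × String) → Int → String
  | [], _ => "good"                 -- 'if not is_find_range: return good'
  | (r, q) :: rest, food_index =>
      if r.1 ≤ food_index ∧ food_index < r.2 then q
      else handle_food_index_loop rest food_index

def handle_food_index (food_index : Int) : String :=
  handle_food_index_loop index_ranges food_index

-- ===== PORT B =====
def handle_food_index_alt (food_index : Int) : String :=
  if 0 ≤ food_index ∧ food_index < 5 then "bad"
  else if 5 ≤ food_index ∧ food_index < 10 then "medium"
  else "good"

-- ===== PRECONDITION & SPEC =====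
def Spec_handle_food_index (food_index : Int) (out : String) : Prop := out = handle_food_index_alt food_index
instance (food_index : Int) (out : String) : Decidable (Spec_handle_food_index food_index out) := by unfold Spec_handle_food_index; infer_instance

-- ===== CLAIM (what is proved, stated in full; the proofs are below) =====
def Claim_equal_handle_food_index : Prop := ∀ (food_index : Int), Dom_handle_food_index food_index → Spec_handle_food_index food_index (handle_food_index food_index)

-- ===== LEMMAS AND PROOFS =====

-- ===== VERDICT (by name: the statement is the Claim_ definition above) =====
theorem handle_food_index_spec : Claim_equal_handle_food_index := by
  intro x _
  unfold Spec_handle_food_index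
  simp only [handle_food_index, index_ranges, handle_food_index_loop, handle_food_index_alt]
  split_ifs <;> rfl
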